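-- pv_equiv track=rewrite | github.com/FelixSchuSi/advent-of-code-21 | 03/second_puzzle.py | get_occurances_of_one_per_position
-- ===== SOURCE A (Python) =====
-- def get_occurances_of_one_per_position(lines):
--     occurances_of_one_per_position = []
--     for line in lines:
--         for index, char in enumerate(list(line.strip())):
--             if len(occurances_of_one_per_position) < index + 1:
--                 occurances_of_one_per_position.append(0)
--             occurances_of_one_per_position[index] += int(char)
--     return occurances_of_one_per_position
-- ===== SOURCE B (Python) =====
-- def get_occurances_of_one_per_position(lines):
--     # Column-major: strip once, then sum each column, padding ragged lines with '0'.
--     stripped = [line.strip() for line in lines]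
--     width = 0
--     for line in stripped:
--         width = max(width, len(line))
--     return [sum(int(line[i] if i < len(line) else '0') for line in stripped)
--             for i in range(width)]
-- ===== Notes on version B (the rewrite author's own statement) =====
-- stated objective: idiomatic
-- what changed: Replaced A's row-major loop that grows and mutates a running counter list per character with a column-major reduction: strip all lines once, compute the width, and sum each column directly ('0'-padding ragged lines).
import Mathlib
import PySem

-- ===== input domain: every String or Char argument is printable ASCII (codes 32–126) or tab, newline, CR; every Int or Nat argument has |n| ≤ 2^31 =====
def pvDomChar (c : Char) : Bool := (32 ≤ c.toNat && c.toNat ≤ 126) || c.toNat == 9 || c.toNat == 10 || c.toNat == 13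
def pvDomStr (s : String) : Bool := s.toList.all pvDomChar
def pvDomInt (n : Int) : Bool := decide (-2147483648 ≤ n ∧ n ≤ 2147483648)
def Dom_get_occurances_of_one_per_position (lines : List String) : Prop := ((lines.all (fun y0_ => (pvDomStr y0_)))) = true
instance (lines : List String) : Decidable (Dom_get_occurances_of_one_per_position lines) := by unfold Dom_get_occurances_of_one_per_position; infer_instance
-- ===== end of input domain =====

-- B replaces A's row-major mutation of a growing counter list with a column-major (transposed) sum; same cost, more idiomatic.

-- ===== PORT A =====
-- int(char) for a single character; `.getD 0` is never reached inside Pre_ (there int(c) succeeds)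
def pvIntOf (c : Char) : Int := (PySem.Int.ofChars? [c]).getD 0

-- one step of A's inner loop: `if len(occ) < index + 1: occ.append(0)` then `occ[index] += int(char)`
def pvStepA (occ : List Int) (p : Int × Char) : List Int :=
  let occ' := if (occ.length : Int) < p.1 + 1 then occ ++ [0] else occ
  occ'.set p.1.toNat (occ'.getD p.1.toNat 0 + pvIntOf p.2)

def get_occurances_of_one_per_position (lines : List String) : List Int :=
  lines.foldl (fun occ line =>
    (PySem.List.enumerate (PySem.Chars.strip line.toList) 0).foldl pvStepA occ) []

-- ===== PORT B =====
def get_occurances_of_one_per_position_alt (lines : List String) : List Int :=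
  let stripped := lines.map (fun line => PySem.Chars.strip line.toList)
  let width := stripped.foldl (fun w line => max w line.length) 0
  (List.range width).map (fun i =>
    stripped.foldl (fun s line => s + pvIntOf (line.getD i '0')) 0)

-- ===== PRECONDITION & SPEC =====
-- Pre_ excludes exactly the inputs on which Python A raises ValueError: some stripped line
-- contains a character c for which int(c) fails (any non-digit character).
def Pre_get_occurances_of_one_per_position (lines : List String) : Prop :=
  (lines.all (fun line =>
    (PySem.Chars.strip line.toList).all (fun c => (PySem.Int.ofChars? [c]).isSome))) = true
instance (lines : List String) : Decidable (Pre_get_occurances_of_one_per_position lines) := by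
  unfold Pre_get_occurances_of_one_per_position; infer_instance
def pvWitness_get_occurances_of_one_per_position : List String := ["101", " 0110 ", "11"]

def Spec_get_occurances_of_one_per_position (lines : List String) (out : List Int) : Prop := out = get_occurances_of_one_per_position_alt lines
instance (lines : List String) (out : List Int) : Decidable (Spec_get_occurances_of_one_per_position lines out) := by unfold Spec_get_occurances_of_one_per_position; infer_instance

-- ===== CLAIM (what is proved, stated in full; the proofs are below) =====
def Claim_equal_get_occurances_of_one_per_position : Prop := ∀ (lines : List String), Dom_get_occurances_of_one_per_position lines → Pre_get_occurances_of_one_per_position lines → Spec_get_occurances_of_one_per_position lines (get_occurances_of_one_per_position lines)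

-- ===== LEMMAS AND PROOFS =====

-- column value of row r at position i ('0'-padded past the end)
def pvU (r : List Char) (i : Nat) : Int := pvIntOf (r.getD i '0')

theorem pvIntOf_zero : pvIntOf '0' = 0 := by decide

theorem pvU_past (r : List Char) (i : Nat) (h : r.length ≤ i) : pvU r i = 0 := by
  simp [pvU, List.getD_eq_getElem?_getD, List.getElem?_eq_none h, pvIntOf_zero]

-- A's single character step, characterised by length and getD
theorem stepA_length (occ : List Int) (k : Nat) (c : Char) (hk : k ≤ occ.length) :
    (pvStepA occ ((k : Int), c)).length = max occ.length (k + 1) := by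
  simp only [pvStepA]
  split_ifs with h <;> simp at h <;> simp [List.length_set] <;> omega

theorem stepA_getD (occ : List Int) (k : Nat) (c : Char) (hk : k ≤ occ.length) (i : Nat) :
    (pvStepA occ ((k : Int), c)).getD i 0 =
      occ.getD i 0 + (if i = k then pvIntOf c else 0) := by
  simp only [pvStepA, Int.toNat_natCast]
  by_cases h : (occ.length : Int) < (k : Int) + 1
  · rw [if_pos h]
    have hlen : occ.length = k := by
      have : occ.length < k + 1 := by exact_mod_cast h
      omega
    simp only [List.getD_eq_getElem?_getD, List.getElem?_set]
    by_cases hik : i = k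
    · subst hik
      simp [← hlen]
    · have hne : ¬ (k = i) := fun hh => hik hh.symm
      simp only [hne, if_false]
      rcases Nat.lt_or_ge i occ.length with hi | hi
      · simp [List.getElem?_append_left hi, hik]
      · have h1 : (occ ++ [(0:Int)]).length ≤ i := by
          simp only [List.length_append, List.length_singleton]; omega
        simp [List.getElem?_eq_none h1, List.getElem?_eq_none hi, hik]
  · rw [if_neg h]
    have hklt : k < occ.length := by
      have : ¬ occ.length < k + 1 := by exact_mod_cast h
      omega
    simp only [List.getD_eq_getElem?_getD, List.getElem?_set]
    by_cases hik : i = k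
    · subst hik
      simp [hklt]
    · have hne : ¬ (k = i) := fun hh => hik hh.symm
      simp [hne, hik]

-- A's inner loop over enumerate(stripped line) started at index k
theorem inner_spec (r : List Char) : ∀ (occ : List Int) (k : Nat), k ≤ occ.length →
    ((PySem.List.enumerate r (k : Int)).foldl pvStepA occ).length = max occ.length (k + r.length)
    ∧ ∀ i : Nat, ((PySem.List.enumerate r (k : Int)).foldl pvStepA occ).getD i 0 =
        occ.getD i 0 + (if k ≤ i then pvU r (i - k) else 0) := by
  induction r with
  | nil =>
    intro occ k hk
    rw [PySem.List.enumerate_nil]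
    refine ⟨by simp; omega, ?_⟩
    intro i
    simp only [List.foldl_nil]
    split_ifs with h
    · rw [pvU_past _ _ (by simp)]; ring
    · ring
  | cons c cs ih =>
    intro occ k hk
    rw [PySem.List.enumerate_cons, List.foldl_cons]
    have hcast : (k : Int) + 1 = ((k + 1 : Nat) : Int) := by push_cast; ring
    have hlen1 := stepA_length occ k c hk
    have hk1 : k + 1 ≤ (pvStepA occ ((k : Int), c)).length := by rw [hlen1]; omega
    rw [hcast]
    obtain ⟨ihlen, ihgd⟩ := ih (pvStepA occ ((k : Int), c)) (k + 1) hk1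
    constructor
    · rw [ihlen, hlen1, List.length_cons]; omega
    · intro i
      rw [ihgd i, stepA_getD occ k c hk i]
      by_cases h1 : i < k
      · have e1 : ¬ (k ≤ i) := by omega
        have e2 : ¬ (k + 1 ≤ i) := by omega
        have e3 : ¬ (i = k) := by omega
        simp [e1, e2, e3]
      · by_cases h2 : i = k
        · subst h2
          have e1 : ¬ (i + 1 ≤ i) := by omega
          simp [e1, pvU]
        · obtain ⟨j, rfl⟩ : ∃ j, i = k + 1 + j := ⟨i - k - 1, by omega⟩
          have e1 : k + 1 + j - (k + 1) = j := by omega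
          have e2 : k + 1 + j - k = j + 1 := by omega
          have e3 : ¬ (k + 1 + j = k) := by omega
          have e4 : k ≤ k + 1 + j := by omega
          have e5 : k + 1 ≤ k + 1 + j := by omega
          simp only [e1, e2, e3, if_pos e4, if_pos e5, if_false]
          simp [pvU]

-- A's outer loop over the lines, characterised by length and getD
theorem outer_spec (lines : List String) : ∀ (occ : List Int),
    (lines.foldl (fun o line => (PySem.List.enumerate (PySem.Chars.strip line.toList) 0).foldl pvStepA o) occ).length
      = lines.foldl (fun w line => max w (PySem.Chars.strip line.toList).length) occ.length
    ∧ ∀ i : Nat, (lines.foldl (fun o line => (PySem.List.enumerate (PySem.Chars.strip line.toList) 0).foldl pvStepA o) occ).getD i 0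
      = lines.foldl (fun s line => s + pvU (PySem.Chars.strip line.toList) i) (occ.getD i 0) := by
  induction lines with
  | nil => intro occ; simp
  | cons l rest ih =>
    intro occ
    simp only [List.foldl_cons]
    have h0 : ((0:Nat) : Int) = (0 : Int) := rfl
    obtain ⟨hlen, hgd⟩ := inner_spec (PySem.Chars.strip l.toList) occ 0 (Nat.zero_le _)
    rw [h0] at hlen hgd
    obtain ⟨ihlen, ihgd⟩ := ih ((PySem.List.enumerate (PySem.Chars.strip l.toList) 0).foldl pvStepA occ)
    constructor
    · rw [ihlen, hlen]; simp
    · intro i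
      rw [ihgd i, hgd i]
      simp [pvU]

-- ===== VERDICT (by name: the statement is the Claim_ definition above) =====
theorem get_occurances_of_one_per_position_spec : Claim_equal_get_occurances_of_one_per_position := by
  intro lines _ _
  unfold Spec_get_occurances_of_one_per_position
  simp only [get_occurances_of_one_per_position, get_occurances_of_one_per_position_alt,
    List.foldl_map]
  obtain ⟨hlen, hgd⟩ := outer_spec lines []
  apply List.ext_getElem
  · simpa using hlen
  · intro i h1 h2
    simp only [List.getElem_map, List.getElem_range]
    rw [← List.getD_eq_getElem _ 0 h1, hgd i]
    simp [pvU]
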